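-- pv_equiv track=rewrite | github.com/Bobbywealth/BetPredictor | utils/live_scores_api.py | _determine_game_state
-- ===== SOURCE A (Python) =====
-- def _determine_game_state(status_name: str, status_detail: str) -> str:
--     """Determine standardized game state from ESPN status"""
--
--     status_lower = status_name.lower()
--     detail_lower = status_detail.lower()
--
--     if 'final' in status_lower:
--         return 'final'
--     elif any(word in status_lower for word in ['in progress', 'live', '1st', '2nd', '3rd', '4th']):
--         return 'live'
--     elif 'halftime' in status_lower or 'half' in detail_lower:
--         return 'halftime'
--     elif 'overtime' in status_lower or 'ot' in detail_lower:
--         return 'overtime'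
--     elif 'delayed' in status_lower:
--         return 'delayed'
--     elif 'postponed' in status_lower:
--         return 'postponed'
--     elif 'canceled' in status_lower:
--         return 'canceled'
--     else:
--         return 'scheduled'
-- ===== SOURCE B (Python) =====
-- # B: evaluate every rule exhaustively into a set of matched states, then pick the
-- # highest-priority matched state with min(); no short-circuit cascade.
-- _PRIORITY = ('final', 'live', 'halftime', 'overtime', 'delayed', 'postponed', 'canceled')
--
-- _STATUS_KEYS = {
--     'final': ('final',),
--     'live': ('in progress', 'live', '1st', '2nd', '3rd', '4th'),
--     'halftime': ('halftime',),
--     'overtime': ('overtime',),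
--     'delayed': ('delayed',),
--     'postponed': ('postponed',),
--     'canceled': ('canceled',),
-- }
-- _DETAIL_KEYS = {'halftime': ('half',), 'overtime': ('ot',)}
--
-- def _determine_game_state(status_name: str, status_detail: str) -> str:
--     s = status_name.lower()
--     d = status_detail.lower()
--     hits = {st for st, keys in _STATUS_KEYS.items() if any(k in s for k in keys)}
--     hits |= {st for st, keys in _DETAIL_KEYS.items() if any(k in d for k in keys)}
--     return min(hits, key=_PRIORITY.index) if hits else 'scheduled'
-- ===== Notes on version B (the rewrite author's own statement) =====
-- stated objective: alternative
-- what changed: Instead of a short-circuiting if/elif cascade, B evaluates every keyword rule, collects ALL matching states into a set, and then selects the highest-priority matched state with min over a priority table (default 'scheduled' for the empty set).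
import Mathlib
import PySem

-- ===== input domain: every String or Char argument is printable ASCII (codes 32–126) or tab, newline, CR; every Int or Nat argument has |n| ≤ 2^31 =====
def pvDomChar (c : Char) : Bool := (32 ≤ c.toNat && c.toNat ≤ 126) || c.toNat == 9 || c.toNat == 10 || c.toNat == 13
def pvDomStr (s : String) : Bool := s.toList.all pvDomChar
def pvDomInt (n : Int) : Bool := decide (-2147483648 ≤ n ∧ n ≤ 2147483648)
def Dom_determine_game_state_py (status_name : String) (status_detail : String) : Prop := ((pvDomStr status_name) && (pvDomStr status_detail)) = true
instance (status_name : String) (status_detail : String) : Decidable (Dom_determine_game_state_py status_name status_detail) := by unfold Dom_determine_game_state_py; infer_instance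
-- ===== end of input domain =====

-- B evaluates every keyword rule, collects all matching states into a set, and picks the
-- highest-priority matched state with a min-by-priority pass (alternative; same cost).

-- ===== PORT A =====
def determine_game_state_py (status_name : String) (status_detail : String) : String :=
  let status_lower := PySem.Str.lower status_name
  let detail_lower := PySem.Str.lower status_detail
  if PySem.Str.isIn "final" status_lower then "final"
  else if ["in progress", "live", "1st", "2nd", "3rd", "4th"].any
      (fun w => PySem.Str.isIn w status_lower) then "live"
  else if PySem.Str.isIn "halftime" status_lower || PySem.Str.isIn "half" detail_lower then "halftime"
  else if PySem.Str.isIn "overtime" status_lower || PySem.Str.isIn "ot" detail_lower then "overtime"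
  else if PySem.Str.isIn "delayed" status_lower then "delayed"
  else if PySem.Str.isIn "postponed" status_lower then "postponed"
  else if PySem.Str.isIn "canceled" status_lower then "canceled"
  else "scheduled"

-- ===== PORT B =====
def pvPriority : List String :=
  ["final", "live", "halftime", "overtime", "delayed", "postponed", "canceled"]

def pvStatusKeys : List (String × List String) :=
  [ ("final", ["final"]),
    ("live", ["in progress", "live", "1st", "2nd", "3rd", "4th"]),
    ("halftime", ["halftime"]),
    ("overtime", ["overtime"]),
    ("delayed", ["delayed"]),
    ("postponed", ["postponed"]),
    ("canceled", ["canceled"]) ]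

def pvDetailKeys : List (String × List String) :=
  [ ("halftime", ["half"]), ("overtime", ["ot"]) ]

-- _PRIORITY.index as a total rank (every state occurring in the tables is in pvPriority)
def pvRank (st : String) : Nat := (PySem.List.index? pvPriority st).getD 1000

-- min(hits, key=_PRIORITY.index): first element of minimal rank (rank is injective on the
-- distinct states, so the result does not depend on set iteration order); [] → 'scheduled'
def pvMinByRank : List String → String
  | [] => "scheduled"
  | x :: xs => xs.foldl (fun b y => if pvRank y < pvRank b then y else b) x

def determine_game_state_py_alt (status_name : String) (status_detail : String) : String :=
  let s := PySem.Str.lower status_name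
  let d := PySem.Str.lower status_detail
  let hits : PySem.Set String :=
    PySem.Set.ofList ((pvStatusKeys.filter
      (fun p => p.2.any (fun k => PySem.Str.isIn k s))).map Prod.fst)
  let hits := PySem.Set.union hits ((pvDetailKeys.filter
      (fun p => p.2.any (fun k => PySem.Str.isIn k d))).map Prod.fst)
  pvMinByRank hits

-- ===== PRECONDITION & SPEC =====
def Spec_determine_game_state_py (status_name : String) (status_detail : String) (out : String) : Prop := out = determine_game_state_py_alt status_name status_detail
instance (status_name : String) (status_detail : String) (out : String) : Decidable (Spec_determine_game_state_py status_name status_detail out) := by unfold Spec_determine_game_state_py; infer_instance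

-- ===== CLAIM =====
def Claim_equal_determine_game_state_py : Prop := ∀ (status_name : String) (status_detail : String), Dom_determine_game_state_py status_name status_detail → Spec_determine_game_state_py status_name status_detail (determine_game_state_py status_name status_detail)

-- ===== LEMMAS AND PROOFS =====

-- ===== VERDICT =====
theorem determine_game_state_py_spec : Claim_equal_determine_game_state_py := by
  intro sn sd _
  unfold Spec_determine_game_state_py determine_game_state_py determine_game_state_py_alt
    pvStatusKeys pvDetailKeys
  generalize PySem.Str.lower sn = sl
  generalize PySem.Str.lower sd = dl
  simp only [List.any_cons, List.any_nil, Bool.or_false, List.filter]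
  generalize PySem.Str.isIn "final" sl = b1
  generalize PySem.Str.isIn "in progress" sl = b2
  generalize PySem.Str.isIn "live" sl = b3
  generalize PySem.Str.isIn "1st" sl = b4
  generalize PySem.Str.isIn "2nd" sl = b5
  generalize PySem.Str.isIn "3rd" sl = b6
  generalize PySem.Str.isIn "4th" sl = b7
  generalize PySem.Str.isIn "halftime" sl = b8
  generalize PySem.Str.isIn "half" dl = b9
  generalize PySem.Str.isIn "overtime" sl = b10
  generalize PySem.Str.isIn "ot" dl = b11
  generalize PySem.Str.isIn "delayed" sl = b12
  generalize PySem.Str.isIn "postponed" sl = b13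
  generalize PySem.Str.isIn "canceled" sl = b14
  revert b1 b2 b3 b4 b5 b6 b7 b8 b9 b10 b11 b12 b13 b14
  decide
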